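-- pv_equiv track=rewrite | github.com/ewuerger/Heatmap | Gui.py | spec_ord
-- ===== SOURCE A (Python) =====
-- from copy import deepcopy
--
-- def spec_ord(list):
--     old , new = deepcopy(list), ['', '', '', '']
--     while len(old) > 0:
--         stri = old.pop()
--         if stri == 'sward':
--             new[2] = stri
--         elif stri == 'cward':
--             new[0] = stri
--         elif stri == 'tward':
--             new[1] = stri
--         elif stri == 'fward':
--             new[3] = stri
--     new = [i for i in new if i != '']
--     return new
-- ===== SOURCE B (Python) =====
-- def spec_ord(list):
--     return [w for w in ('cward', 'tward', 'sward', 'fward') if w in list]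
-- ===== Notes on version B (the rewrite author's own statement) =====
-- stated objective: simpler
-- what changed: B iterates over the fixed canonical ward order and keeps each ward present in the input, instead of A's deepcopy + destructive pop loop writing into a 4-slot array that is then filtered of empty strings.
import Mathlib
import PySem

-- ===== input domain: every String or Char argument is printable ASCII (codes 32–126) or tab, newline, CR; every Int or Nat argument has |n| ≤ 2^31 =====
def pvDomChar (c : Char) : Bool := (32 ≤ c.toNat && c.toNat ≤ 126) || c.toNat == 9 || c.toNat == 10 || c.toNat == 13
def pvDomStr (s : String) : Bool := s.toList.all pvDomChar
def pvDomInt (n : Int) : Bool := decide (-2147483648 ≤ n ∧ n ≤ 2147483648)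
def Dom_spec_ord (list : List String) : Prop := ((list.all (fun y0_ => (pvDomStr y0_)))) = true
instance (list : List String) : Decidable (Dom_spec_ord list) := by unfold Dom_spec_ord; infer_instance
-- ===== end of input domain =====

-- B iterates the fixed canonical ward order with membership tests; A pops a copy of the input into a 4-slot array, then filters out the empty slots. Objective: simpler.

-- ===== PORT A =====
-- the while-loop: `old.pop()` takes the last element, so each step consumes old's last element
def spec_ord_loop (old new : List String) : List String :=
  if h : old.isEmpty then new
  else
    let stri := old.getLast (by simpa using h)
    spec_ord_loop old.dropLast
      (if stri = "sward" then new.set 2 stri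
       else if stri = "cward" then new.set 0 stri
       else if stri = "tward" then new.set 1 stri
       else if stri = "fward" then new.set 3 stri
       else new)
  termination_by old.length
  decreasing_by cases old with
    | nil => simp at h
    | cons a as => simp [List.length_dropLast]

def spec_ord (list : List String) : List String :=
  (spec_ord_loop list ["", "", "", ""]).filter (fun i => i ≠ "")

-- ===== PORT B =====
def spec_ord_alt (list : List String) : List String :=
  ["cward", "tward", "sward", "fward"].filter (fun w => list.contains w)

-- ===== PRECONDITION & SPEC =====
def Spec_spec_ord (list : List String) (out : List String) : Prop := out = spec_ord_alt list
instance (list : List String) (out : List String) : Decidable (Spec_spec_ord list out) := by unfold Spec_spec_ord; infer_instance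

-- ===== CLAIM (what is proved, stated in full; the proofs are below) =====
def Claim_equal_spec_ord : Prop := ∀ (list : List String), Dom_spec_ord list → Spec_spec_ord list (spec_ord list)

-- ===== LEMMAS AND PROOFS =====

theorem spec_ord_loop_concat (xs : List String) (x : String) (new : List String) :
    spec_ord_loop (xs ++ [x]) new =
      spec_ord_loop xs
        (if x = "sward" then new.set 2 x
         else if x = "cward" then new.set 0 x
         else if x = "tward" then new.set 1 x
         else if x = "fward" then new.set 3 x
         else new) := by
  rw [spec_ord_loop]
  simp

-- the loop's result slot-by-slot: slot i ends as its ward iff that ward occurs in `old`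
theorem spec_ord_loop_char (old : List String) (a b c d : String) :
    spec_ord_loop old [a, b, c, d] =
      [if "cward" ∈ old then "cward" else a,
       if "tward" ∈ old then "tward" else b,
       if "sward" ∈ old then "sward" else c,
       if "fward" ∈ old then "fward" else d] := by
  induction old using List.reverseRecOn generalizing a b c d with
  | nil => simp [spec_ord_loop]
  | append_singleton xs x ih =>
    rw [spec_ord_loop_concat]
    by_cases hs : x = "sward" <;> by_cases hc : x = "cward" <;>
      by_cases ht : x = "tward" <;> by_cases hf : x = "fward" <;>
      simp_all [List.mem_append] <;>
      split_ifs <;> simp_all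

set_option maxRecDepth 8000 in
theorem spec_ord_eq_alt (list : List String) : spec_ord list = spec_ord_alt list := by
  unfold spec_ord spec_ord_alt
  rw [spec_ord_loop_char]
  by_cases hc : "cward" ∈ list <;> by_cases ht : "tward" ∈ list <;>
    by_cases hs : "sward" ∈ list <;> by_cases hf : "fward" ∈ list <;>
    simp [hc, ht, hs, hf, List.filter, List.contains_eq_mem]

-- ===== VERDICT (by name: the statement is the Claim_ definition above) =====
theorem spec_ord_spec : Claim_equal_spec_ord := by
  intro list _
  exact spec_ord_eq_alt list
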